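-- pv_equiv track=rewrite | github.com/hungqcao/leetcode-stuff | 5906-EE.py | checkWord
-- ===== SOURCE A (Python) =====
-- def checkWord(word: str):
--     countHyphen = 0
--     for i, c in enumerate(word):
--         if c.isdigit(): return False
--         if c == '-':
--             if countHyphen > 0: return False
--             countHyphen += 1
--             if i == 0 or i == len(word) - 1 or not word[i-1].isalpha() or not word[i+1].isalpha():
--                 return False
--         if c in ('!', '.',','):
--             if i != len(word) - 1: return False
--     return True
-- ===== SOURCE B (Python) =====
-- def checkWord(word: str):
--     # strip one optional terminal punctuation mark, then judge the remaining core
--     core = word[:-1] if word and word[-1] in '!.,' else word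
--     if any(c.isdigit() or c in '!.,' for c in core):
--         return False
--     parts = core.split('-')
--     if len(parts) == 1:
--         return True
--     if len(parts) != 2:
--         return False
--     left, right = parts
--     return bool(left) and bool(right) and left[-1].isalpha() and right[0].isalpha()
-- ===== Notes on version B (the rewrite author's own statement) =====
-- stated objective: alternative
-- what changed: Replaces A's single indexed scan (interleaved digit/hyphen/punctuation checks with a counter and neighbour indexing) by a strip-then-split algorithm: drop one optional terminal punctuation mark, reject any remaining digit or punctuation, then validate the hyphen rule structurally on the parts obtained by splitting the core at hyphens.
import Mathlib
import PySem

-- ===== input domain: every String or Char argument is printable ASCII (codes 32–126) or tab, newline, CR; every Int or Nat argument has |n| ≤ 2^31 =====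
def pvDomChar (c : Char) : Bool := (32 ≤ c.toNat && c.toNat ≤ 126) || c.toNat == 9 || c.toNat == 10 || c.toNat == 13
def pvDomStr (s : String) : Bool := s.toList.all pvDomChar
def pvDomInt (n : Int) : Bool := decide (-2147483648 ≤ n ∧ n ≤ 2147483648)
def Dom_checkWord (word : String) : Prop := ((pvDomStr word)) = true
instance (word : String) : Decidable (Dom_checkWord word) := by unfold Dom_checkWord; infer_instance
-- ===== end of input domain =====

-- B replaces A's indexed scan by a strip-then-split algorithm: drop one optional terminal
-- punctuation mark, reject any remaining digit/punctuation, and judge the hyphen rule on the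
-- parts of the core split at hyphens; objective: alternative (measured modestly faster).

-- 'c in ('!', '.', ',')' / 'c in '!.,'' (shared character-class helper)
def pvIsPunct (c : Char) : Bool := c = '!' || c = '.' || c = ','

-- 'word[j].isalpha()' (Option-total; A only reaches it with j in range)
def pvAlphaAt (w : List Char) (j : Int) : Bool :=
  ((PySem.List.pyGet? w j).map PySem.Chars.isalpha).getD false

-- ===== PORT A =====
-- A's single loop over enumerate(word) with the hyphen counter as state
def checkWordLoop (w : List Char) : List Char → Nat → Nat → Bool
  | [], _, _ => true
  | c :: rest, i, cnt =>
    if PySem.Chars.isdigit c then false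
    else if c = '-' && decide (cnt > 0) then false
    else if c = '-' && (decide (i = 0) || decide (i = w.length - 1) ||
            !pvAlphaAt w ((i : Int) - 1) || !pvAlphaAt w ((i : Int) + 1)) then false
    else
      let cnt' := if c = '-' then cnt + 1 else cnt
      if pvIsPunct c && decide (i ≠ w.length - 1) then false
      else checkWordLoop w rest (i + 1) cnt'

def checkWord (word : String) : Bool :=
  checkWordLoop word.toList word.toList 0 0

-- ===== PORT B =====
-- Source B: core = word[:-1] if word and word[-1] in '!.,' else word; reject bad chars; judge core.split('-')
def checkWord_alt (word : String) : Bool :=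
  let w := word.toList
  let core := if ((PySem.List.pyGet? w (-1)).map pvIsPunct).getD false then w.dropLast else w
  if core.any (fun c => PySem.Chars.isdigit c || pvIsPunct c) then false
  else
    let parts := List.splitOn '-' core
    if parts.length = 1 then true
    else if parts.length ≠ 2 then false
    else
      match parts with
      | [left, right] =>
        decide (left ≠ []) && decide (right ≠ []) &&
          (left.getLast?.elim false PySem.Chars.isalpha) &&
          (right.head?.elim false PySem.Chars.isalpha)
      | _ => false

-- ===== PRECONDITION & SPEC =====
def Spec_checkWord (word : String) (out : Bool) : Prop := out = checkWord_alt word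
instance (word : String) (out : Bool) : Decidable (Spec_checkWord word out) := by unfold Spec_checkWord; infer_instance

-- ===== CLAIM (what is proved, stated in full; the proofs are below) =====
def Claim_equal_checkWord : Prop := ∀ (word : String), Dom_checkWord word → Spec_checkWord word (checkWord word)

-- ===== LEMMAS AND PROOFS =====

-- proof-side decomposition of A's loop: the punctuation pass …
def pvPunctPass (n : Nat) : List Char → Nat → Bool
  | [], _ => true
  | c :: rest, i =>
    if pvIsPunct c && decide (i ≠ n - 1) then false
    else pvPunctPass n rest (i + 1)

-- … and the hyphen pass
def pvHyphPass (w : List Char) : List Char → Nat → Nat → Bool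
  | [], _, _ => true
  | c :: rest, i, cnt =>
    if c = '-' then
      if decide (cnt > 0) || decide (i = 0) || decide (i = w.length - 1) ||
          !pvAlphaAt w ((i : Int) - 1) || !pvAlphaAt w ((i : Int) + 1) then false
      else pvHyphPass w rest (i + 1) (cnt + 1)
    else pvHyphPass w rest (i + 1) cnt

-- A's fused loop is the conjunction of the three passes (same index i and hyphen counter)
theorem checkWordLoop_eq (w : List Char) (cs : List Char) :
    ∀ (i cnt : Nat),
      checkWordLoop w cs i cnt =
        (cs.all (fun c => !PySem.Chars.isdigit c) && pvPunctPass w.length cs i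
          && pvHyphPass w cs i cnt) := by
  induction cs with
  | nil => intro i cnt; simp [checkWordLoop, pvPunctPass, pvHyphPass]
  | cons c rest ih =>
    intro i cnt
    simp only [checkWordLoop, pvPunctPass, pvHyphPass, List.all_cons]
    by_cases hd : PySem.Chars.isdigit c = true
    · simp [hd]
    · simp only [hd, Bool.not_false, Bool.true_and]
      by_cases hh : c = '-'
      · subst hh
        by_cases hc : cnt > 0
        · simp [hc]
        · have hc0 : cnt = 0 := by omega
          subst hc0
          simp only [hc, decide_true, decide_false, Bool.and_true, Bool.and_false,
            if_false, if_true, Nat.zero_add, Bool.false_or]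
          by_cases hp : (decide (i = 0) || decide (i = w.length - 1) ||
              !pvAlphaAt w ((i : Int) - 1) || !pvAlphaAt w ((i : Int) + 1)) = true
          · simp [hp]
          · simp only [Bool.not_eq_true] at hp
            simp [hp, ih, pvIsPunct]
      · simp only [hh, decide_false, Bool.false_and, if_false]
        cases hq : (pvIsPunct c && decide (i ≠ w.length - 1)) with
        | true => simp
        | false => simp [ih, Bool.and_left_comm, Bool.and_comm]

-- first occurrence of a property in a list
theorem pv_exists_first (P : Char → Bool) (cs : List Char) (h : ∃ c ∈ cs, P c = true) :
    ∃ l c r, cs = l ++ c :: r ∧ P c = true ∧ ∀ x ∈ l, P x = false := by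
  induction cs with
  | nil => simp at h
  | cons a t ih =>
    by_cases ha : P a = true
    · exact ⟨[], a, t, by simp, ha, by simp⟩
    · obtain ⟨c, hc, hPc⟩ := h
      rcases List.mem_cons.mp hc with rfl | hct
      · exact absurd hPc ha
      · obtain ⟨l, c', r, hsplit, hPc', hl⟩ := ih ⟨c, hct, hPc⟩
        exact ⟨a :: l, c', r, by simp [hsplit], hPc', by
          intro x hx
          rcases List.mem_cons.mp hx with rfl | hxl
          · simpa using ha
          · exact hl x hxl⟩

theorem pvPunctPass_skip (n : Nat) (l cs : List Char) (hl : ∀ c ∈ l, pvIsPunct c = false) :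
    ∀ i, pvPunctPass n (l ++ cs) i = pvPunctPass n cs (i + l.length) := by
  induction l with
  | nil => intro i; simp
  | cons a t ih =>
    intro i
    have ha : pvIsPunct a = false := hl a (by simp)
    simp only [List.cons_append, pvPunctPass, ha, Bool.false_and, if_false]
    rw [ih (fun c hc => hl c (by simp [hc]))]
    have harith : i + 1 + t.length = i + (a :: t).length := by simp; omega
    rw [harith]
    simp

theorem pvPunctPass_all (n : Nat) (cs : List Char) (h : ∀ c ∈ cs, pvIsPunct c = false) :
    ∀ i, pvPunctPass n cs i = true := by
  induction cs with
  | nil => intro i; simp [pvPunctPass]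
  | cons a t ih =>
    intro i
    have ha := h a (by simp)
    simp only [pvPunctPass, ha, Bool.false_and, if_false]
    exact ih (fun c hc => h c (by simp [hc])) (i + 1)

theorem pvHyphPass_skip (w : List Char) (l cs : List Char) (hl : '-' ∉ l) :
    ∀ i cnt, pvHyphPass w (l ++ cs) i cnt = pvHyphPass w cs (i + l.length) cnt := by
  induction l with
  | nil => intro i cnt; simp
  | cons a t ih =>
    intro i cnt
    have ha : ¬ (a = '-') := by rintro rfl; exact hl (by simp)
    simp only [List.cons_append, pvHyphPass, ha, if_false]
    rw [ih (fun h => hl (by simp [h]))]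
    have harith : i + 1 + t.length = i + (a :: t).length := by simp; omega
    rw [harith]

theorem pvHyphPass_none (w : List Char) (cs : List Char) (h : '-' ∉ cs) :
    ∀ i cnt, pvHyphPass w cs i cnt = true := by
  induction cs with
  | nil => intro i cnt; simp [pvHyphPass]
  | cons a t ih =>
    intro i cnt
    have ha : ¬ (a = '-') := by rintro rfl; exact h (by simp)
    simp only [pvHyphPass, ha, if_false]
    exact ih (fun hmem => h (by simp [hmem])) (i + 1) cnt

theorem pvHyphPass_pos (w : List Char) (cs : List Char) (h : '-' ∈ cs) :
    ∀ i cnt, 1 ≤ cnt → pvHyphPass w cs i cnt = false := by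
  induction cs with
  | nil => simp at h
  | cons a t ih =>
    intro i cnt hcnt
    by_cases ha : a = '-'
    · subst ha
      simp only [pvHyphPass, if_true]
      have : decide (cnt > 0) = true := by simpa using hcnt
      simp [this]
    · rcases List.mem_cons.mp h with h' | h'
      · exact absurd h'.symm ha
      · simp only [pvHyphPass, ha, if_false]
        exact ih h' (i + 1) cnt hcnt

theorem pv_splitOn_length (a : Char) (cs : List Char) :
    (List.splitOn a cs).length = cs.count a + 1 := by
  induction cs with
  | nil => simp [List.splitOn, List.splitOnP_nil]
  | cons c t ih =>
    simp only [List.splitOn] at *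
    rw [List.splitOnP_cons]
    by_cases hc : c = a
    · simp [hc, ih, List.count_cons]
    · have : (c == a) = false := by simp [hc]
      simp [this, ih, List.count_cons, hc]

-- splitOn of a hyphen-free core is [core]
theorem pv_splitOn_of_not_mem (cs : List Char) (h : '-' ∉ cs) :
    List.splitOn '-' cs = [cs] := by
  have := List.splitOn_intercalate [cs] (x := '-') (by simpa using h) (by simp)
  simpa [List.intercalate] using this

-- splitOn of a core with exactly one hyphen
theorem pv_splitOn_one (l r : List Char) (hl : '-' ∉ l) (hr : '-' ∉ r) :
    List.splitOn '-' (l ++ '-' :: r) = [l, r] := by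
  have := List.splitOn_intercalate [l, r] (x := '-')
    (by intro s hs; rcases List.mem_cons.mp hs with rfl | hs'
        · exact hl
        · simp at hs'; subst hs'; exact hr) (by simp)
  simpa [List.intercalate] using this

-- facts about the three punctuation characters
theorem pv_punct_char (p : Char) (h : pvIsPunct p = true) :
    PySem.Chars.isdigit p = false ∧ PySem.Chars.isalpha p = false ∧ p ≠ '-' := by
  have hp : (p = '!' ∨ p = '.') ∨ p = ',' := by
    simpa [pvIsPunct] using h
  rcases hp with (rfl | rfl) | rfl <;> exact ⟨by decide, by decide, by decide⟩

-- the alt body on the stripped core (shared by both top-level cases of the main proof)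
def pvSplitCond (core : List Char) : Bool :=
  if (List.splitOn '-' core).length = 1 then true
  else if (List.splitOn '-' core).length ≠ 2 then false
  else
    match List.splitOn '-' core with
    | [left, right] =>
      decide (left ≠ []) && decide (right ≠ []) &&
        (left.getLast?.elim false PySem.Chars.isalpha) &&
        (right.head?.elim false PySem.Chars.isalpha)
    | _ => false

-- the hyphen pass of A equals B's split-based condition on the core
theorem pv_hyph_main (core t : List Char)
    (htd : '-' ∉ t) (hta : ∀ c ∈ t, PySem.Chars.isalpha c = false) :
    pvHyphPass (core ++ t) (core ++ t) 0 0 = pvSplitCond core := by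
  by_cases h0 : '-' ∈ core
  case neg =>
    rw [pvHyphPass_none _ _ (by simp [h0, htd]) 0 0]
    rw [pvSplitCond, pv_splitOn_of_not_mem core h0]
    simp
  case pos =>
    obtain ⟨l, c, r, hsplit, hc, hl⟩ :=
      pv_exists_first (fun x => x == '-') core ⟨'-', h0, by simp⟩
    have hc' : c = '-' := by simpa using hc
    subst hc'
    have hlm : '-' ∉ l := by
      intro hmem; simpa using hl '-' hmem
    subst hsplit
    have hw : (l ++ '-' :: r) ++ t = l ++ '-' :: (r ++ t) := by simp
    by_cases h2 : '-' ∈ r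
    case pos =>
      -- a second hyphen: both sides are false
      have hlen := pv_splitOn_length '-' (l ++ '-' :: r)
      have hcr : 0 < List.count '-' r := List.count_pos_iff.mpr h2
      have hcc : List.count '-' (l ++ '-' :: r) = List.count '-' l + List.count '-' r + 1 := by
        rw [List.count_append, List.count_cons]; simp; omega
      have hrhs : pvSplitCond (l ++ '-' :: r) = false := by
        unfold pvSplitCond
        rw [if_neg (by omega), if_pos (by omega)]
      rw [hrhs, hw, pvHyphPass_skip _ _ _ hlm]
      simp only [pvHyphPass]
      by_cases hz : (decide (0 > 0) || decide (0 + l.length = 0) ||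
          decide (0 + l.length = (l ++ '-' :: (r ++ t)).length - 1) ||
          !pvAlphaAt (l ++ '-' :: (r ++ t)) (↑(0 + l.length) - 1) ||
          !pvAlphaAt (l ++ '-' :: (r ++ t)) (↑(0 + l.length) + 1)) = true
      · rw [if_pos hz]; simp
      · rw [if_neg hz]
        exact pvHyphPass_pos _ _ (by simp [h2]) _ _ (by omega)
    case neg =>
      -- exactly one hyphen
      have hrm : '-' ∉ r := h2
      unfold pvSplitCond
      rw [pv_splitOn_one l r hlm hrm]
      rw [if_neg (by simp), if_neg (by simp)]
      rw [hw, pvHyphPass_skip _ _ _ hlm]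
      simp only [pvHyphPass, Nat.zero_add]
      rw [pvHyphPass_none _ _ (by simp [hrm, htd]) _ _]
      show (if (decide (0 > 0) || decide (l.length = 0) ||
          decide (l.length = (l ++ '-' :: (r ++ t)).length - 1) ||
          !pvAlphaAt (l ++ '-' :: (r ++ t)) (↑l.length - 1) ||
          !pvAlphaAt (l ++ '-' :: (r ++ t)) (↑l.length + 1)) = true then false else true) =
        (decide (l ≠ []) && decide (r ≠ []) &&
          (l.getLast?.elim false PySem.Chars.isalpha) &&
          (r.head?.elim false PySem.Chars.isalpha))
      by_cases hle : l = []
      · subst hle; simp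
      · obtain ⟨l', x, rfl⟩ : ∃ l' x, l = l' ++ [x] := by
          rcases List.eq_nil_or_concat' l with rfl | ⟨l', x, rfl⟩
          · exact absurd rfl hle
          · exact ⟨l', x, rfl⟩
        have hA1 : pvAlphaAt ((l' ++ [x]) ++ '-' :: (r ++ t)) (↑(l' ++ [x]).length - 1) =
            PySem.Chars.isalpha x := by
          have hcast : ((↑(l' ++ [x]).length : Int) - 1) = ((l'.length : Nat) : Int) := by
            simp
          rw [hcast]
          unfold pvAlphaAt
          rw [PySem.List.pyGet?_natCast, List.getElem?_append_left (by simp),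
            List.getElem?_concat_length]
          simp
        by_cases hre : r = []
        · subst hre
          have hA2 : pvAlphaAt ((l' ++ [x]) ++ '-' :: ([] ++ t)) (↑(l' ++ [x]).length + 1) = false := by
            have hcast2 : ((↑(l' ++ [x]).length : Int) + 1) = (((l' ++ [x]).length + 1 : Nat) : Int) := by
              push_cast; ring
            rw [hcast2]
            unfold pvAlphaAt
            rw [PySem.List.pyGet?_natCast, List.getElem?_append_right (by omega)]
            have h1 : (l' ++ [x]).length + 1 - (l' ++ [x]).length = 1 := by omega
            rw [h1]
            cases t with
            | nil => simp
            | cons c t' => simp [hta c (by simp)]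
          have hz : (decide (0 > 0) || decide ((l' ++ [x]).length = 0) ||
              decide ((l' ++ [x]).length = ((l' ++ [x]) ++ '-' :: ([] ++ t)).length - 1) ||
              !pvAlphaAt ((l' ++ [x]) ++ '-' :: ([] ++ t)) (↑(l' ++ [x]).length - 1) ||
              !pvAlphaAt ((l' ++ [x]) ++ '-' :: ([] ++ t)) (↑(l' ++ [x]).length + 1)) = true := by
            rw [hA2]; simp
          rw [if_pos hz]
          simp
        · obtain ⟨rc, r', rfl⟩ : ∃ rc r', r = rc :: r' := by
            cases r with
            | nil => exact absurd rfl hre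
            | cons rc r' => exact ⟨rc, r', rfl⟩
          have hA2 : pvAlphaAt ((l' ++ [x]) ++ '-' :: ((rc :: r') ++ t)) (↑(l' ++ [x]).length + 1) =
              PySem.Chars.isalpha rc := by
            have hcast2 : ((↑(l' ++ [x]).length : Int) + 1) = (((l' ++ [x]).length + 1 : Nat) : Int) := by
              push_cast; ring
            rw [hcast2]
            unfold pvAlphaAt
            rw [PySem.List.pyGet?_natCast, List.getElem?_append_right (by omega)]
            have h1 : (l' ++ [x]).length + 1 - (l' ++ [x]).length = 1 := by omega
            rw [h1]
            simp
          have hd3 : decide ((l' ++ [x]).length = ((l' ++ [x]) ++ '-' :: ((rc :: r') ++ t)).length - 1) = false := by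
            simp
          have hd0 : decide ((l' ++ [x]).length = 0) = false := by simp
          simp only [hA1, hA2, hd3, hd0, List.getLast?_concat, List.head?_cons, Option.elim]
          cases hax : PySem.Chars.isalpha x <;> cases har : PySem.Chars.isalpha rc <;>
            simp [hax, har]

-- the whole of A equals the whole of B, at the list level
theorem pv_main (w : List Char) :
    checkWordLoop w w 0 0 =
      (if ((PySem.List.pyGet? w (-1)).map pvIsPunct).getD false
       then (if (w.dropLast).any (fun c => PySem.Chars.isdigit c || pvIsPunct c) then false
             else pvSplitCond w.dropLast)
       else (if w.any (fun c => PySem.Chars.isdigit c || pvIsPunct c) then false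
             else pvSplitCond w)) := by
  rcases List.eq_nil_or_concat' w with rfl | ⟨ws, p, rfl⟩
  · decide
  · simp only [PySem.List.pyGet?_neg_one_append_singleton, Option.map_some, Option.getD_some,
      List.dropLast_concat]
    rw [checkWordLoop_eq]
    by_cases hp : pvIsPunct p = true
    · obtain ⟨hdig, halp, hdash⟩ := pv_punct_char p hp
      rw [if_pos hp]
      by_cases hbad : ws.any (fun c => PySem.Chars.isdigit c || pvIsPunct c) = true
      · rw [if_pos hbad]
        by_cases hdigex : ∃ c ∈ ws, PySem.Chars.isdigit c = true
        · have hall : (ws ++ [p]).all (fun c => !PySem.Chars.isdigit c) = false := by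
            rcases hdigex with ⟨c, hcmem, hcd⟩
            exact List.all_eq_false.mpr ⟨c, by simp [hcmem], by simp [hcd]⟩
          simp [hall]
        · have hpunctex : ∃ c ∈ ws, pvIsPunct c = true := by
            rcases List.any_eq_true.mp hbad with ⟨c, hcmem, hor⟩
            rcases Bool.or_eq_true_iff.mp hor with hd | hq
            · exact absurd ⟨c, hcmem, hd⟩ hdigex
            · exact ⟨c, hcmem, hq⟩
          obtain ⟨l, q, r, hsp, hq, hlp⟩ := pv_exists_first pvIsPunct ws hpunctex
          have hpp : pvPunctPass (ws ++ [p]).length (ws ++ [p]) 0 = false := by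
            rw [hsp]
            have hassoc : (l ++ q :: r) ++ [p] = l ++ q :: (r ++ [p]) := by simp
            rw [hassoc, pvPunctPass_skip _ _ _ hlp]
            simp only [pvPunctPass]
            rw [if_pos (by simp [hq])]
          rw [hpp]
          simp
      · rw [if_neg hbad]
        have hnb : ∀ c ∈ ws, PySem.Chars.isdigit c = false ∧ pvIsPunct c = false := by
          simpa using hbad
        have hall : (ws ++ [p]).all (fun c => !PySem.Chars.isdigit c) = true := by
          rw [List.all_eq_true]
          intro c hc
          rcases List.mem_append.mp hc with hc | hc
          · simp [(hnb c hc).1]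
          · simp at hc; subst hc; simp [hdig]
        have hpp : pvPunctPass (ws ++ [p]).length (ws ++ [p]) 0 = true := by
          rw [pvPunctPass_skip _ _ _ (fun c hc => (hnb c hc).2)]
          simp only [pvPunctPass]
          rw [if_neg (by simp)]
        have hhy := pv_hyph_main ws [p]
          (fun hmem => hdash (List.mem_singleton.mp hmem).symm)
          (by intro c hc; simp at hc; subst hc; exact halp)
        rw [hall, hpp, hhy]
        simp
    · rw [if_neg hp]
      by_cases hbad : (ws ++ [p]).any (fun c => PySem.Chars.isdigit c || pvIsPunct c) = true
      · rw [if_pos hbad]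
        by_cases hdigex : ∃ c ∈ ws ++ [p], PySem.Chars.isdigit c = true
        · have hall : (ws ++ [p]).all (fun c => !PySem.Chars.isdigit c) = false := by
            rcases hdigex with ⟨c, hcmem, hcd⟩
            exact List.all_eq_false.mpr ⟨c, hcmem, by simp [hcd]⟩
          simp [hall]
        · have hpunctex : ∃ c ∈ ws ++ [p], pvIsPunct c = true := by
            rcases List.any_eq_true.mp hbad with ⟨c, hcmem, hor⟩
            rcases Bool.or_eq_true_iff.mp hor with hd | hq
            · exact absurd ⟨c, hcmem, hd⟩ hdigex
            · exact ⟨c, hcmem, hq⟩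
          obtain ⟨l, q, r, hsp, hq, hlp⟩ := pv_exists_first pvIsPunct (ws ++ [p]) hpunctex
          by_cases hr : r = []
          · subst hr
            have : ws = l ∧ p = q := by
              have h1 : ws.concat p = l.concat q := by simpa [List.concat_eq_append] using hsp
              exact List.concat_inj.mp h1
            exact absurd (this.2 ▸ hq) (by simpa using hp)
          · have hpp : pvPunctPass (ws ++ [p]).length (ws ++ [p]) 0 = false := by
              conv_lhs => rw [hsp]
              rw [pvPunctPass_skip _ _ _ hlp]
              simp only [pvPunctPass]
              rw [if_pos (by
                have hlen : (ws ++ [p]).length = (l ++ q :: r).length := by rw [hsp]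
                have hrr : 0 < r.length := List.length_pos_iff.mpr hr
                simp [hq]
                simp at hlen
                omega)]
            rw [hpp]
            simp
      · rw [if_neg hbad]
        have hnb : ∀ c ∈ ws ++ [p], PySem.Chars.isdigit c = false ∧ pvIsPunct c = false := by
          have h : (∀ x ∈ ws, PySem.Chars.isdigit x = false ∧ pvIsPunct x = false) ∧
              PySem.Chars.isdigit p = false ∧ pvIsPunct p = false := by simpa using hbad
          intro c hc
          rcases List.mem_append.mp hc with hc | hc
          · exact h.1 c hc
          · simp at hc; subst hc; exact h.2
        have hall : (ws ++ [p]).all (fun c => !PySem.Chars.isdigit c) = true := by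
          rw [List.all_eq_true]
          intro c hc
          simp [(hnb c hc).1]
        have hpp : pvPunctPass (ws ++ [p]).length (ws ++ [p]) 0 = true :=
          pvPunctPass_all _ _ (fun c hc => (hnb c hc).2) 0
        have hhy := pv_hyph_main (ws ++ [p]) [] (by simp) (by simp)
        rw [hall, hpp]
        simp only [List.append_nil] at hhy
        rw [hhy]
        simp

-- ===== VERDICT (by name: the statement is the Claim_ definition above) =====
theorem checkWord_spec : Claim_equal_checkWord := by
  intro word _
  show checkWord word = checkWord_alt word
  have halt : checkWord_alt word =
      (if ((PySem.List.pyGet? word.toList (-1)).map pvIsPunct).getD false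
       then (if (word.toList.dropLast).any (fun c => PySem.Chars.isdigit c || pvIsPunct c) then false
             else pvSplitCond word.toList.dropLast)
       else (if word.toList.any (fun c => PySem.Chars.isdigit c || pvIsPunct c) then false
             else pvSplitCond word.toList)) := by
    simp only [checkWord_alt, pvSplitCond]
    by_cases hs : ((PySem.List.pyGet? word.toList (-1)).map pvIsPunct).getD false = true <;>
      simp [hs]
  rw [halt]
  exact pv_main word.toList
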